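-- pv_equiv track=rewrite | github.com/IHA089/TR-Chat | MSG_ENC.py | KEY_DEC
-- ===== SOURCE A (Python) =====
-- kd = ['a', 'm', 'y', 'K', 'W']
--
-- k9 = ['b', 'n', 'z', 'L', 'X']
--
-- kc = ['c', 'o', 'A', 'M', 'Y']
--
-- k6 = ['d', 'p', 'B', 'N', 'Z']
--
-- k3 = ['e', 'q', 'C', 'O', '!']
--
-- k0 = ['f', 'r', 'D', 'P', '@']
--
-- k4 = ['g', 's', 'E', 'Q', '#']
--
-- k7 = ['h', 't', 'F', 'R', '$']
--
-- k8 = ['i', 'u', 'G', 'S']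
--
-- k2 = ['j', 'v', 'H', 'T']
--
-- k1 = ['k', 'w', 'I', 'U']
--
-- k5 = ['l', 'x', 'J', 'V']
--
-- def KEY_DEC(data):
--     ndata = ""
--     for char in data:
--         if char in k0:
--             ndata = ndata+"0"
--         elif char in k1:
--             ndata = ndata+"1"
--         elif char in k2:
--             ndata = ndata+"2"
--         elif char in k3:
--             ndata = ndata+"3"
--         elif char in k4:
--             ndata = ndata+"4"
--         elif char in k5:
--             ndata = ndata+"5"
--         elif char in k6:
--             ndata = ndata+"6"
--         elif char in k7:
--             ndata = ndata+"7"
--         elif char in k8: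
--             ndata = ndata+"8"
--         elif char in k9:
--             ndata = ndata+"9"
--         elif char in kd:
--             ndata = ndata+"."
--         elif char in kc:
--             ndata = ndata+":"
--     return ndata
-- ===== SOURCE B (Python) =====
-- _CODES = ".9:630478215"
-- _SYM = {'!': '3', '@': '0', '#': '4', '$': '7'}
--
-- def KEY_DEC(data):
--     out = []
--     for ch in data:
--         if 'a' <= ch <= 'z':
--             out.append(_CODES[(ord(ch) - 97) % 12])
--         elif 'A' <= ch <= 'Z':
--             out.append(_CODES[(ord(ch) - 63) % 12])
--         elif ch in _SYM:
--             out.append(_SYM[ch])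
--     return "".join(out)
-- ===== Notes on version B (the rewrite author's own statement) =====
-- stated objective: alternative
-- what changed: The twelve membership lists and the 12-way if/elif chain are replaced by arithmetic on the character code: the cipher table is periodic with period 12, so letters map to _CODES[(ord(ch)-97)%12] (lowercase) or _CODES[(ord(ch)-63)%12] (uppercase), with only the four punctuation symbols kept in a tiny dict; unmatched characters are skipped as in A. Mechanism: one O(1) arithmetic table index per character instead of scanning up to 58 list elements.
import Mathlib
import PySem

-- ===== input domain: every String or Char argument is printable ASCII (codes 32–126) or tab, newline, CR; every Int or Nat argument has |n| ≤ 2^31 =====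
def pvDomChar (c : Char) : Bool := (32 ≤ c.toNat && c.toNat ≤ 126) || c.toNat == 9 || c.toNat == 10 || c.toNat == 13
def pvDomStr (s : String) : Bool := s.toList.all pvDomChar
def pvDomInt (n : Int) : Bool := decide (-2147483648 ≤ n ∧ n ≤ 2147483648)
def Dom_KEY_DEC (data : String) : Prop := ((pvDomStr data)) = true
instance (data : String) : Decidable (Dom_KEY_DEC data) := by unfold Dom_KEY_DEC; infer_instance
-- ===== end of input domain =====

-- B replaces A's twelve membership lists and 12-way if/elif chain by arithmetic on the
-- character code: the code table is periodic, so the output symbol is _CODES[(ord-k)%12]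
-- for letters, plus a four-entry dict for the symbols (objective: simpler).

-- ===== PORT A =====
def kd : List Char := ['a', 'm', 'y', 'K', 'W']
def k9 : List Char := ['b', 'n', 'z', 'L', 'X']
def kc : List Char := ['c', 'o', 'A', 'M', 'Y']
def k6 : List Char := ['d', 'p', 'B', 'N', 'Z']
def k3 : List Char := ['e', 'q', 'C', 'O', '!']
def k0 : List Char := ['f', 'r', 'D', 'P', '@']
def k4 : List Char := ['g', 's', 'E', 'Q', '#']
def k7 : List Char := ['h', 't', 'F', 'R', '$']
def k8 : List Char := ['i', 'u', 'G', 'S']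
def k2 : List Char := ['j', 'v', 'H', 'T']
def k1 : List Char := ['k', 'w', 'I', 'U']
def k5 : List Char := ['l', 'x', 'J', 'V']

-- the loop body of A (the 12-way if/elif chain), as a named step function
def KEY_DEC_step (ndata : List Char) (char : Char) : List Char :=
    if char ∈ k0 then ndata ++ ['0']
    else if char ∈ k1 then ndata ++ ['1']
    else if char ∈ k2 then ndata ++ ['2']
    else if char ∈ k3 then ndata ++ ['3']
    else if char ∈ k4 then ndata ++ ['4']
    else if char ∈ k5 then ndata ++ ['5']
    else if char ∈ k6 then ndata ++ ['6']
    else if char ∈ k7 then ndata ++ ['7']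
    else if char ∈ k8 then ndata ++ ['8']
    else if char ∈ k9 then ndata ++ ['9']
    else if char ∈ kd then ndata ++ ['.']
    else if char ∈ kc then ndata ++ [':']
    else ndata

def KEY_DEC (data : String) : String :=
  String.ofList (data.toList.foldl KEY_DEC_step [])

-- ===== PORT B =====
-- _CODES = ".9:630478215"
def pvCODES : List Char := ['.', '9', ':', '6', '3', '0', '4', '7', '8', '2', '1', '5']
-- _SYM = {'!': '3', '@': '0', '#': '4', '$': '7'}
def pvSYM : PySem.Dict Char String :=
  PySem.Dict.ofList [('!', "3"), ('@', "0"), ('#', "4"), ('$', "7")]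

-- the loop body of B: classify by character-code arithmetic
def KEY_DEC_alt_body (out : List String) (ch : Char) : List String :=
  if 'a' ≤ ch ∧ ch ≤ 'z' then
    -- _CODES[(ord(ch) - 97) % 12]; the index is always in range, so pyGet? never fails here
    match PySem.List.pyGet? pvCODES (PySem.Int.mod ((ch.toNat : Int) - 97) 12) with
    | some c => out ++ [String.singleton c]
    | none => out
  else if 'A' ≤ ch ∧ ch ≤ 'Z' then
    -- _CODES[(ord(ch) - 63) % 12]; likewise always in range
    match PySem.List.pyGet? pvCODES (PySem.Int.mod ((ch.toNat : Int) - 63) 12) with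
    | some c => out ++ [String.singleton c]
    | none => out
  else if pvSYM.contains ch then
    -- _SYM[ch]: guarded by the membership test, so the key is present
    out ++ [pvSYM.getD ch ""]
  else out

def KEY_DEC_alt (data : String) : String :=
  PySem.Str.join "" (data.toList.foldl KEY_DEC_alt_body [])

-- ===== PRECONDITION & SPEC =====
def Spec_KEY_DEC (data : String) (out : String) : Prop := out = KEY_DEC_alt data
instance (data : String) (out : String) : Decidable (Spec_KEY_DEC data out) := by unfold Spec_KEY_DEC; infer_instance

-- ===== CLAIM (what is proved, stated in full; the proofs are below) =====
def Claim_equal_KEY_DEC : Prop := ∀ (data : String), Dom_KEY_DEC data → Spec_KEY_DEC data (KEY_DEC data)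

-- ===== LEMMAS AND PROOFS =====

set_option maxHeartbeats 2000000
set_option maxRecDepth 4000

-- A's step only appends to its accumulator
theorem stepA_append (acc : List Char) (c : Char) :
    KEY_DEC_step acc c = acc ++ KEY_DEC_step [] c := by
  simp only [KEY_DEC_step, apply_ite (fun l : List Char => acc ++ l), List.append_nil, List.nil_append]

-- B's step only appends to its accumulator
theorem stepB_append (out : List String) (c : Char) :
    KEY_DEC_alt_body out c = out ++ KEY_DEC_alt_body [] c := by
  unfold KEY_DEC_alt_body
  cases PySem.List.pyGet? pvCODES (PySem.Int.mod ((c.toNat : Int) - 97) 12) <;>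
    cases PySem.List.pyGet? pvCODES (PySem.Int.mod ((c.toNat : Int) - 63) 12) <;>
      simp only [apply_ite (fun l : List String => out ++ l), List.append_nil, List.nil_append]

-- A's fold is the concatenation of its per-character pieces
theorem foldA_eq (l : List Char) (acc : List Char) :
    l.foldl KEY_DEC_step acc = acc ++ (l.map (KEY_DEC_step [])).flatten := by
  induction l generalizing acc with
  | nil => simp
  | cons c t ih =>
    simp only [List.foldl_cons, List.map_cons, List.flatten_cons]
    rw [stepA_append, ih, List.append_assoc]

-- B's fold is the concatenation of its per-character pieces
theorem foldB_eq (l : List Char) (acc : List String) :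
    l.foldl KEY_DEC_alt_body acc = acc ++ (l.map (KEY_DEC_alt_body [])).flatten := by
  induction l generalizing acc with
  | nil => simp
  | cons c t ih =>
    simp only [List.foldl_cons, List.map_cons, List.flatten_cons]
    rw [stepB_append, ih, List.append_assoc]

-- joining with the empty separator is flattening
theorem join_empty_sep (xss : List (List Char)) : PySem.Chars.join [] xss = xss.flatten := by
  induction xss with
  | nil => simp [PySem.Chars.join_nil]
  | cons a t ih =>
    cases t with
    | nil => simp [PySem.Chars.join_singleton]
    | cons b r => rw [PySem.Chars.join_cons_cons]; simp [ih]

-- per character, on the first 128 code points, A's piece equals B's piece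
theorem piece_eq_lt (n : Nat) (h : n < 128) :
    KEY_DEC_step [] (Char.ofNat n)
      = ((KEY_DEC_alt_body [] (Char.ofNat n)).map String.toList).flatten := by
  revert n h; decide

-- the same for any character of the domain
theorem piece_eq (c : Char) (h : pvDomChar c = true) :
    KEY_DEC_step [] c = ((KEY_DEC_alt_body [] c).map String.toList).flatten := by
  have hlt : c.toNat < 128 := by
    unfold pvDomChar at h; simp only [Bool.or_eq_true, Bool.and_eq_true,
      decide_eq_true_eq, beq_iff_eq] at h; omega
  have := piece_eq_lt c.toNat hlt
  rwa [Char.ofNat_toNat] at this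

-- on a list of domain characters the two piece maps flatten to the same characters
theorem pieces_eq (l : List Char) (h : ∀ c ∈ l, pvDomChar c = true) :
    (l.map (KEY_DEC_step [])).flatten
      = (((l.map (KEY_DEC_alt_body [])).flatten).map String.toList).flatten := by
  induction l with
  | nil => simp
  | cons c t ih =>
    simp only [List.map_cons, List.flatten_cons, List.map_append, List.flatten_append]
    rw [piece_eq c (h c (List.mem_cons_self ..)),
        ih (fun x hx => h x (List.mem_cons_of_mem _ hx))]

-- ===== VERDICT (by name: the statement is the Claim_ definition above) =====
theorem KEY_DEC_spec : Claim_equal_KEY_DEC := by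
  intro data hdom
  unfold Spec_KEY_DEC KEY_DEC KEY_DEC_alt
  rw [foldA_eq, foldB_eq]
  rw [← String.toList_inj, PySem.Str.toList_join]
  have hall : ∀ c ∈ data.toList, pvDomChar c = true := by
    unfold Dom_KEY_DEC pvDomStr at hdom; simpa [List.all_eq_true] using hdom
  simp only [List.nil_append, String.toList_ofList]
  rw [pieces_eq data.toList hall]
  simp [join_empty_sep]
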